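-- pv_equiv track=rewrite | github.com/parsons-kyle-89/advent-of-code-2020 | day19/main.py | matches_front_and_back_equal
-- ===== SOURCE A (Python) =====
-- from typing import Dict, Iterator, Set, Tuple, Union
--
-- def matches_front_and_back_equal(
--     string: str,
--     pref_flat_rule: Set[str],
--     suff_flat_rule: Set[str],
-- ) -> bool:
--     return (
--         any(
--             string == pref + suff
--             for pref in pref_flat_rule
--             for suff in suff_flat_rule
--         ) or
--         any(
--             matches_front_and_back_equal(
--                 stripped,
--                 pref_flat_rule,
--                 suff_flat_rule,
--             )
--             for pref in pref_flat_rule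
--             for suff in suff_flat_rule
--             if len(stripped := (
--                string
--                .removeprefix(pref)
--                .removesuffix(suff)
--             )) == len(string) - len(pref) - len(suff)
--         )
--     )
-- ===== SOURCE B (Python) =====
-- def matches_front_and_back_equal(string, pref_flat_rule, suff_flat_rule):
--     n = len(string)
--     # for each prefix p: bit f set iff string[f:] starts with p
--     pref_masks = []
--     for p in pref_flat_rule:
--         m = 0
--         for f in range(n + 1):
--             if string.startswith(p, f):
--                 m |= 1 << f
--         pref_masks.append((len(p), m))
--     # for each suffix s: bit b set iff string[:b] ends with s
--     suff_masks = []
--     for s in suff_flat_rule: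
--         m = 0
--         for b in range(n + 1):
--             if b >= len(s) and string.endswith(s, 0, b):
--                 m |= 1 << b
--         suff_masks.append((len(s), m))
--     # front: bit f iff string[:f] is a concat of m prefixes; back: bit b iff string[b:] is
--     # a concat of m suffixes; a match meets at one position with the same m >= 1
--     front, back = 1, 1 << n
--     for _ in range(n):
--         nf = 0
--         for lp, m in pref_masks:
--             nf |= (front & m) << lp
--         nb = 0
--         for ls, m in suff_masks:
--             nb |= (back & m) >> ls
--         front, back = nf, nb
--         if front & back:
--             return True
--     return False
-- ===== Notes on version B (the rewrite author's own statement) =====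
-- stated objective: faster
-- what changed: A's exponential recursion over stripped substrings is replaced by an iterative layered DP: bitmask layers of positions reachable by m prefix steps from the front and m suffix steps from the back, intersected per layer for a meeting point with equal counts.
-- outside the precondition, e.g. on matches_front_and_back_equal('', {''}, {''}): A returns True, B returns False
import Mathlib
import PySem

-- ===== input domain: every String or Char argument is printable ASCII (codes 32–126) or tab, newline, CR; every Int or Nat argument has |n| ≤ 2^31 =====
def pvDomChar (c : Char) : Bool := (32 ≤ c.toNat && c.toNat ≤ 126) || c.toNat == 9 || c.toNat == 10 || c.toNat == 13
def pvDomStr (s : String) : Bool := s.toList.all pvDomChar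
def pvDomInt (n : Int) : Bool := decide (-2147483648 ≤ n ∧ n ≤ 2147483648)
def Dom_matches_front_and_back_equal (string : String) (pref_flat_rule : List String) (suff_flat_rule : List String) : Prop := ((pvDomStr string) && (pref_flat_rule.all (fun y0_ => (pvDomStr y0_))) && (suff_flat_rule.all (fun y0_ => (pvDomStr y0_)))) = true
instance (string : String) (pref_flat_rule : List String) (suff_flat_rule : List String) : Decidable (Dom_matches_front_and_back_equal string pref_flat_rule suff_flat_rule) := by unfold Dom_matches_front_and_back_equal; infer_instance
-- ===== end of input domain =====

-- B replaces A's exponential recursion over stripped substrings by an iterative layered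
-- DP over reachable index intervals (f, b); objective: faster (asymptotic).

-- ===== PORT A =====
-- str.removeprefix, hand-ported (exact: removes p iff it is a prefix)
def pvRemoveprefix (cs p : List Char) : List Char :=
  if PySem.Chars.startswith cs p then cs.drop p.length else cs

-- str.removesuffix, hand-ported (exact: removes s iff it is a suffix; drops nothing for "")
def pvRemovesuffix (cs s : List Char) : List Char :=
  if PySem.Chars.endswith cs s then cs.take (cs.length - s.length) else cs

-- A's recursion, with fuel = len(string)+1; under Pre_ every recursive call strips at
-- least one character, so the fuel is never exhausted on admitted inputs.
def aGo (P S : List (List Char)) : Nat → List Char → Bool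
  | 0, _ => false
  | fuel+1, cs =>
    (P.any fun p => S.any fun s => cs == p ++ s) ||
    (P.any fun p => S.any fun s =>
      let stripped := pvRemovesuffix (pvRemoveprefix cs p) s
      (((stripped.length : Int) == (cs.length : Int) - (p.length : Int) - (s.length : Int)) &&
        aGo P S fuel stripped))

def matches_front_and_back_equal (string : String) (pref_flat_rule : List String) (suff_flat_rule : List String) : Bool :=
  aGo (pref_flat_rule.map String.toList) (suff_flat_rule.map String.toList)
    (string.toList.length + 1) string.toList

-- ===== PORT B =====
-- the mask of one prefix p: bit f set iff string.startswith(p, f), f in range(n+1)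
-- (string.startswith(p, f) is ported as (cs.drop f).take p.length = p — exact for 0 ≤ f)
def pvPrefMask (cs p : List Char) : Nat :=
  (List.range (cs.length + 1)).foldl
    (fun acc f => if (cs.drop f).take p.length = p then acc ||| (1 <<< f) else acc) 0

-- the mask of one suffix s: bit b set iff b >= len(s) and string.endswith(s, 0, b)
-- (string.endswith(s, 0, b) is ported as (cs.drop (b - s.length)).take s.length = s)
def pvSuffMask (cs s : List Char) : Nat :=
  (List.range (cs.length + 1)).foldl
    (fun acc b => if s.length ≤ b ∧ (cs.drop (b - s.length)).take s.length = s
                  then acc ||| (1 <<< b) else acc) 0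

-- nf |= (front & m) << lp  over pref_masks
def bStepF (front : Nat) (pmasks : List (Nat × Nat)) : Nat :=
  pmasks.foldl (fun acc lm => acc ||| ((front &&& lm.2) <<< lm.1)) 0

-- nb |= (back & m) >> ls  over suff_masks
def bStepB (back : Nat) (smasks : List (Nat × Nat)) : Nat :=
  smasks.foldl (fun acc lm => acc ||| ((back &&& lm.2) >>> lm.1)) 0

-- the 'for _ in range(n)' loop; 'if front & back: return True' tests the int for nonzero
def bLoop (pmasks smasks : List (Nat × Nat)) : Nat → Nat → Nat → Bool
  | 0, _, _ => false
  | k+1, front, back =>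
    let nf := bStepF front pmasks
    let nb := bStepB back smasks
    if nf &&& nb ≠ 0 then true else bLoop pmasks smasks k nf nb

def matches_front_and_back_equal_alt (string : String) (pref_flat_rule : List String) (suff_flat_rule : List String) : Bool :=
  bLoop ((pref_flat_rule.map String.toList).map fun p => (p.length, pvPrefMask string.toList p))
        ((suff_flat_rule.map String.toList).map fun s => (s.length, pvSuffMask string.toList s))
        string.toList.length 1 (1 <<< string.toList.length)

-- ===== PRECONDITION & SPEC =====
-- Pre_ excludes inputs where "" is in both rule sets: there A's recursion can re-enter with
-- unchanged arguments, so A raises RecursionError or returns True depending on set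
-- iteration order (hash order), which is not a specifiable value.
def Pre_matches_front_and_back_equal (string : String) (pref_flat_rule : List String) (suff_flat_rule : List String) : Prop :=
  ¬ ("" ∈ pref_flat_rule ∧ "" ∈ suff_flat_rule)
instance (string : String) (pref_flat_rule : List String) (suff_flat_rule : List String) : Decidable (Pre_matches_front_and_back_equal string pref_flat_rule suff_flat_rule) := by unfold Pre_matches_front_and_back_equal; infer_instance

def pvWitness_matches_front_and_back_equal : String × List String × List String := ("aab", ["a", "aa"], ["b", "ab"])

def Spec_matches_front_and_back_equal (string : String) (pref_flat_rule : List String) (suff_flat_rule : List String) (out : Bool) : Prop := out = matches_front_and_back_equal_alt string pref_flat_rule suff_flat_rule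
instance (string : String) (pref_flat_rule : List String) (suff_flat_rule : List String) (out : Bool) : Decidable (Spec_matches_front_and_back_equal string pref_flat_rule suff_flat_rule out) := by unfold Spec_matches_front_and_back_equal; infer_instance

-- ===== CLAIM (what is proved, stated in full; the proofs are below) =====
def Claim_equal_matches_front_and_back_equal : Prop := ∀ (string : String) (pref_flat_rule : List String) (suff_flat_rule : List String), Dom_matches_front_and_back_equal string pref_flat_rule suff_flat_rule → Pre_matches_front_and_back_equal string pref_flat_rule suff_flat_rule → Spec_matches_front_and_back_equal string pref_flat_rule suff_flat_rule (matches_front_and_back_equal string pref_flat_rule suff_flat_rule)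

-- ===== LEMMAS AND PROOFS =====

-- the common specification: string = p1 ++ (p2 ++ (… ++ …) ++ s2) ++ s1 with pi ∈ P, si ∈ S
inductive DecompC (P S : List (List Char)) : List Char → Prop
  | base {p s : List Char} : p ∈ P → s ∈ S → DecompC P S (p ++ s)
  | step {p t s : List Char} : p ∈ P → s ∈ S → DecompC P S t → DecompC P S (p ++ t ++ s)

-- the segment cs[f:b]
def segE (cs : List Char) (f b : Nat) : List Char := (cs.drop f).take (b - f)

theorem segE_cat (cs : List Char) {f m b : Nat} (h1 : f ≤ m) (h2 : m ≤ b) :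
    segE cs f b = segE cs f m ++ segE cs m b := by
  unfold segE
  have h : b - f = (m - f) + (b - m) := by omega
  rw [h, List.take_add, List.drop_drop]
  congr 3
  omega
theorem length_segE (cs : List Char) {f b : Nat} (_hf : f ≤ b) (hb : b ≤ cs.length) :
    (segE cs f b).length = b - f := by
  simp [segE]; omega

theorem segE_extract (cs : List Char) {f b : Nat} {p t s : List Char}
    (hf : f ≤ b) (hb : b ≤ cs.length) (h : segE cs f b = p ++ t ++ s) :
    f + p.length + t.length + s.length = b ∧
    (cs.drop f).take p.length = p ∧
    segE cs (f + p.length) (b - s.length) = t ∧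
    (cs.drop (b - s.length)).take s.length = s := by
  have hlen : (segE cs f b).length = b - f := length_segE cs hf hb
  rw [h] at hlen; simp at hlen
  have harith : f + p.length + t.length + s.length = b := by omega
  have hcat : segE cs f b
      = segE cs f (f + p.length) ++ segE cs (f + p.length) (b - s.length) ++ segE cs (b - s.length) b := by
    rw [← segE_cat cs (by omega) (by omega), ← segE_cat cs (by omega) (by omega)]
  have l1 : (segE cs f (f + p.length)).length = p.length := by
    rw [length_segE cs (by omega) (by omega)]; omega
  have l3 : (segE cs (b - s.length) b).length = s.length := by
    rw [length_segE cs (by omega) (by omega)]; omega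
  rw [hcat] at h
  have h' := h
  rw [List.append_assoc, List.append_assoc] at h'
  obtain ⟨e1, h2⟩ := List.append_inj h' l1
  have l2 : (segE cs (f + p.length) (b - s.length)).length = t.length := by
    rw [length_segE cs (by omega) (by omega)]; omega
  obtain ⟨e2, e3⟩ := List.append_inj h2 l2
  refine ⟨harith, ?_, e2, ?_⟩
  · have := e1
    unfold segE at this
    rw [show f + p.length - f = p.length by omega] at this
    exact this
  · have := e3
    unfold segE at this
    rw [show b - (b - s.length) = s.length by omega] at this
    exact this
theorem segE_combine (cs : List Char) {f b : Nat} {p s : List Char}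
    (hle : f + p.length + s.length ≤ b)
    (hp : (cs.drop f).take p.length = p)
    (hs : (cs.drop (b - s.length)).take s.length = s) :
    segE cs f b = p ++ segE cs (f + p.length) (b - s.length) ++ s := by
  rw [segE_cat cs (Nat.le_add_right f p.length) (by omega : f + p.length ≤ b),
      segE_cat cs (by omega : f + p.length ≤ b - s.length) (by omega : b - s.length ≤ b)]
  have e1 : segE cs f (f + p.length) = p := by
    unfold segE; rw [show f + p.length - f = p.length by omega]; exact hp
  have e2 : segE cs (b - s.length) b = s := by
    unfold segE; rw [show b - (b - s.length) = s.length by omega]; exact hs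
  rw [e1, e2, List.append_assoc]
theorem strip_of_append (cs p t s : List Char) (h : cs = p ++ t ++ s) :
    pvRemovesuffix (pvRemoveprefix cs p) s = t := by
  subst h
  unfold pvRemoveprefix
  rw [if_pos (by rw [PySem.Chars.startswith_iff]; exact ⟨t ++ s, by simp⟩)]
  rw [List.append_assoc, List.drop_left]
  unfold pvRemovesuffix
  rw [if_pos (by rw [PySem.Chars.endswith_iff]; exact ⟨t, rfl⟩)]
  simp
theorem append_of_strip (cs p s : List Char)
    (h : ((pvRemovesuffix (pvRemoveprefix cs p) s).length : Int)
        = (cs.length : Int) - (p.length : Int) - (s.length : Int)) :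
    cs = p ++ pvRemovesuffix (pvRemoveprefix cs p) s ++ s := by
  unfold pvRemoveprefix at *
  by_cases hsw : PySem.Chars.startswith cs p
  · rw [if_pos hsw] at *
    rw [PySem.Chars.startswith_iff] at hsw
    obtain ⟨r, hr⟩ := hsw
    unfold pvRemovesuffix at *
    by_cases hew : PySem.Chars.endswith (cs.drop p.length) s
    · rw [if_pos hew] at *
      rw [PySem.Chars.endswith_iff] at hew
      obtain ⟨u, hu⟩ := hew
      have hdrop : cs.drop p.length = r := by rw [← hr, List.drop_left]
      rw [hdrop] at hu ⊢
      rw [← hu]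
      simp only [List.length_append, Nat.add_sub_cancel, List.take_left]
      rw [← hr, ← hu]
      simp
    · rw [if_neg hew] at *
      exfalso
      have hlen : (cs.drop p.length).length = cs.length - p.length := by simp
      have hple : p.length ≤ cs.length := by
        rw [← hr]; simp
      have hs0 : s.length = 0 := by omega
      have : s = [] := List.eq_nil_of_length_eq_zero hs0
      exact hew (by rw [PySem.Chars.endswith_iff, this]; exact List.nil_suffix)
  · rw [if_neg hsw] at *
    exfalso
    have hp0 : p.length ≠ 0 := by
      intro h0
      exact hsw (by rw [PySem.Chars.startswith_iff, List.eq_nil_of_length_eq_zero h0]; exact List.nil_prefix)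
    unfold pvRemovesuffix at h
    by_cases hew : PySem.Chars.endswith cs s
    · rw [if_pos hew] at h
      rw [PySem.Chars.endswith_iff] at hew
      obtain ⟨u, hu⟩ := hew
      have : s.length ≤ cs.length := by rw [← hu]; simp
      simp only [List.length_take] at h
      omega
    · rw [if_neg hew] at h
      omega
theorem not_both_nil {P S : List (List Char)} (hPre : ¬ ([] ∈ P ∧ [] ∈ S))
    {p s : List Char} (hp : p ∈ P) (hs : s ∈ S) : 1 ≤ p.length + s.length := by
  by_contra hc
  have hp0 : p = [] := List.eq_nil_of_length_eq_zero (by omega)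
  have hs0 : s = [] := List.eq_nil_of_length_eq_zero (by omega)
  exact hPre ⟨hp0 ▸ hp, hs0 ▸ hs⟩

theorem aGo_iff (P S : List (List Char)) (hPre : ¬ ([] ∈ P ∧ [] ∈ S)) :
    ∀ fuel cs, cs.length < fuel → (aGo P S fuel cs = true ↔ DecompC P S cs) := by
  intro fuel
  induction fuel with
  | zero => intro cs h; omega
  | succ f ih =>
    intro cs hlen
    show (_ || _) = true ↔ _
    rw [Bool.or_eq_true]
    constructor
    · rintro (h1 | h2)
      · simp only [List.any_eq_true, beq_iff_eq] at h1
        obtain ⟨p, hp, s, hs, he⟩ := h1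
        exact he ▸ DecompC.base hp hs
      · simp only [List.any_eq_true, Bool.and_eq_true, beq_iff_eq] at h2
        obtain ⟨p, hp, s, hs, hcond, hrec⟩ := h2
        have hdec := append_of_strip cs p s hcond
        set t := pvRemovesuffix (pvRemoveprefix cs p) s with ht
        have h1 : 1 ≤ p.length + s.length := not_both_nil hPre hp hs
        have hlt : t.length < cs.length := by
          have := congrArg List.length hdec
          simp at this
          omega
        exact hdec ▸ DecompC.step hp hs ((ih t (by omega)).mp hrec)
    · intro hd
      cases hd with
      | base hp hs =>
        left
        simp only [List.any_eq_true, beq_iff_eq]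
        exact ⟨_, hp, _, hs, rfl⟩
      | @step p t s hp hs hd' =>
        right
        simp only [List.any_eq_true, Bool.and_eq_true, beq_iff_eq]
        refine ⟨p, hp, s, hs, ?_, ?_⟩
        · rw [strip_of_append _ p t s rfl]
          simp
        · rw [strip_of_append _ p t s rfl]
          have h1 : 1 ≤ p.length + s.length := not_both_nil hPre hp hs
          exact (ih t (by simp at hlen; omega)).mpr hd'
inductive Peel (cs : List Char) (P S : List (List Char)) : Nat → Nat → Nat → Prop
  | zero : Peel cs P S 0 0 cs.length
  | succ {j f b : Nat} {p s : List Char} :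
      Peel cs P S j f b → p ∈ P → s ∈ S →
      f + p.length + s.length ≤ b →
      (cs.drop f).take p.length = p →
      (cs.drop (b - s.length)).take s.length = s →
      Peel cs P S (j+1) (f + p.length) (b - s.length)

def ExactAt (cs : List Char) (P S : List (List Char)) (f b : Nat) : Prop :=
  ∃ p ∈ P, ∃ s ∈ S, f + p.length + s.length = b ∧
    (cs.drop f).take p.length = p ∧ (cs.drop (b - s.length)).take s.length = s

inductive FrontReach (cs : List Char) (P : List (List Char)) : Nat → Nat → Prop
  | zero : FrontReach cs P 0 0
  | succ {m f : Nat} {p : List Char} : FrontReach cs P m f → p ∈ P →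
      (cs.drop f).take p.length = p → FrontReach cs P (m+1) (f + p.length)

inductive BackReach (cs : List Char) (S : List (List Char)) : Nat → Nat → Prop
  | zero : BackReach cs S 0 cs.length
  | succ {m b : Nat} {s : List Char} : BackReach cs S m b → s ∈ S →
      s.length ≤ b → (cs.drop (b - s.length)).take s.length = s → BackReach cs S (m+1) (b - s.length)

theorem peel_front {cs : List Char} {P S : List (List Char)} {j f b : Nat}
    (h : Peel cs P S j f b) : FrontReach cs P j f := by
  induction h with
  | zero => exact FrontReach.zero
  | succ _ hp _ _ hmp _ ih => exact FrontReach.succ ih hp hmp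

theorem peel_back {cs : List Char} {P S : List (List Char)} {j f b : Nat}
    (h : Peel cs P S j f b) : BackReach cs S j b := by
  induction h with
  | succ _ _ hs hle _ hms ih => exact BackReach.succ ih hs (by omega) hms
  | zero => exact BackReach.zero

theorem chains_to_peel {cs : List Char} {P S : List (List Char)} :
    ∀ m f b, FrontReach cs P m f → BackReach cs S m b → f ≤ b → Peel cs P S m f b := by
  intro m
  induction m with
  | zero =>
    intro f b hF hB _
    cases hF; cases hB; exact Peel.zero
  | succ m ih =>
    intro f b hF hB hfb
    cases hF with
    | @succ m f0 p hF0 hp hmp =>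
      cases hB with
      | @succ m b0 s hB0 hs hle hms =>
        have h0 : f0 ≤ b0 := by omega
        exact Peel.succ (ih f0 b0 hF0 hB0 h0) hp hs (by omega) hmp hms

theorem peel_bounds {cs : List Char} {P S : List (List Char)} {j f b : Nat}
    (h : Peel cs P S j f b) : f ≤ b ∧ b ≤ cs.length := by
  induction h with
  | zero => exact ⟨Nat.zero_le _, Nat.le_refl _⟩
  | succ _ _ _ hle _ _ ih => exact ⟨by omega, by omega⟩

theorem peel_count {cs : List Char} {P S : List (List Char)} {j f b : Nat}
    (hPre : ¬ ([] ∈ P ∧ [] ∈ S)) (h : Peel cs P S j f b) : b + j ≤ cs.length + f := by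
  induction h with
  | zero => omega
  | succ _ hp hs hle _ _ ih =>
    have h1 := not_both_nil hPre hp hs
    omega

theorem decomp_of_exact {cs : List Char} {P S : List (List Char)} {f b : Nat}
    (h : ExactAt cs P S f b) : DecompC P S (segE cs f b) := by
  obtain ⟨p, hp, s, hs, heq, hmp, hms⟩ := h
  have hcat : segE cs f b = segE cs f (f + p.length) ++ segE cs (f + p.length) b :=
    segE_cat cs (by omega) (by omega)
  have e1 : segE cs f (f + p.length) = p := by
    unfold segE; rw [show f + p.length - f = p.length by omega]; exact hmp
  have e2 : segE cs (f + p.length) b = s := by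
    unfold segE
    rw [show f + p.length = b - s.length by omega, show b - (b - s.length) = s.length by omega]
    exact hms
  rw [hcat, e1, e2]
  exact DecompC.base hp hs

theorem decomp_of_peel {cs : List Char} {P S : List (List Char)} {j f b : Nat}
    (h : Peel cs P S j f b) : DecompC P S (segE cs f b) → DecompC P S cs := by
  induction h with
  | zero =>
    intro hd
    have : segE cs 0 cs.length = cs := by simp [segE]
    exact this ▸ hd
  | succ _ hp hs hle hmp hms ih =>
    intro hd
    apply ih
    rw [segE_combine cs hle hmp hms]
    exact DecompC.step hp hs hd

theorem success_of_decomp {cs : List Char} {P S : List (List Char)} {u : List Char}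
    (hd : DecompC P S u) : ∀ j f b, Peel cs P S j f b → u = segE cs f b →
    ∃ j' f' b', Peel cs P S j' f' b' ∧ ExactAt cs P S f' b' := by
  induction hd with
  | @base p s hp hs =>
    intro j f b hPeel hu
    obtain ⟨hfb, hbl⟩ := peel_bounds hPeel
    obtain ⟨har, hmp, _, hms⟩ :=
      segE_extract cs hfb hbl (p := p) (t := []) (s := s) (by rw [← hu]; simp)
    exact ⟨j, f, b, hPeel, p, hp, s, hs, by simpa using har, hmp, hms⟩
  | @step p t s hp hs _ ih =>
    intro j f b hPeel hu
    obtain ⟨hfb, hbl⟩ := peel_bounds hPeel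
    obtain ⟨har, hmp, ht, hms⟩ := segE_extract cs hfb hbl (by rw [← hu])
    exact ih (j+1) (f + p.length) (b - s.length)
      (Peel.succ hPeel hp hs (by omega) hmp hms) ht.symm

def frontMaskAt (cs : List Char) (P : List (List Char)) : Nat → Nat
  | 0 => 1
  | m+1 => bStepF (frontMaskAt cs P m) (P.map fun p => (p.length, pvPrefMask cs p))

def backMaskAt (cs : List Char) (S : List (List Char)) : Nat → Nat
  | 0 => 1 <<< cs.length
  | m+1 => bStepB (backMaskAt cs S m) (S.map fun s => (s.length, pvSuffMask cs s))

theorem testBit_maskFold (cond : Nat → Prop) [DecidablePred cond] :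
    ∀ (l : List Nat) (a : Nat) (q : Nat),
    ((l.foldl (fun acc f => if cond f then acc ||| (1 <<< f) else acc) a).testBit q)
      = (a.testBit q || l.any fun f => decide (cond f) && decide (f = q)) := by
  intro l
  induction l with
  | nil => simp
  | cons x t ih =>
    intro a q
    simp only [List.foldl_cons, List.any_cons]
    rw [ih]
    by_cases hc : cond x
    · rw [if_pos hc]
      simp only [Nat.testBit_or, Nat.one_shiftLeft, Nat.testBit_two_pow, hc, decide_true,
        Bool.true_and]
      cases h1 : a.testBit q <;> cases h2 : decide (x = q) <;> simp
    · rw [if_neg hc]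
      simp [hc]

theorem testBit_pvPrefMask (cs p : List Char) (q : Nat) :
    (pvPrefMask cs p).testBit q = true ↔
    q ≤ cs.length ∧ (cs.drop q).take p.length = p := by
  unfold pvPrefMask
  rw [testBit_maskFold (fun f => (cs.drop f).take p.length = p)]
  simp only [Nat.zero_testBit, Bool.false_or, List.any_eq_true, List.mem_range]
  constructor
  · rintro ⟨f, hf, hcond⟩
    simp only [Bool.and_eq_true, decide_eq_true_eq] at hcond
    obtain ⟨h1, rfl⟩ := hcond
    exact ⟨by omega, h1⟩
  · rintro ⟨hq, hm⟩
    exact ⟨q, by omega, by simp [hm]⟩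

theorem testBit_pvSuffMask (cs s : List Char) (q : Nat) :
    (pvSuffMask cs s).testBit q = true ↔
    q ≤ cs.length ∧ s.length ≤ q ∧ (cs.drop (q - s.length)).take s.length = s := by
  unfold pvSuffMask
  rw [testBit_maskFold (fun b => s.length ≤ b ∧ (cs.drop (b - s.length)).take s.length = s)]
  simp only [Nat.zero_testBit, Bool.false_or, List.any_eq_true, List.mem_range]
  constructor
  · rintro ⟨b, hb, hcond⟩
    simp only [Bool.and_eq_true, decide_eq_true_eq] at hcond
    obtain ⟨⟨h1, h2⟩, rfl⟩ := hcond
    exact ⟨by omega, h1, h2⟩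
  · rintro ⟨hq, h1, h2⟩
    exact ⟨q, by omega, by simp [h1, h2]⟩

theorem testBit_foldl_or {α : Type} (g : α → Nat) :
    ∀ (l : List α) (a : Nat) (q : Nat),
    ((l.foldl (fun acc x => acc ||| g x) a).testBit q)
      = (a.testBit q || l.any fun x => (g x).testBit q) := by
  intro l
  induction l with
  | nil => simp
  | cons x t ih =>
    intro a q
    simp only [List.foldl_cons, List.any_cons]
    rw [ih]
    simp only [Nat.testBit_or]
    cases a.testBit q <;> cases (g x).testBit q <;> simp

theorem take_eq_imp_le {cs p : List Char} {f : Nat}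
    (h : (cs.drop f).take p.length = p) : f + p.length ≤ cs.length ∨ p.length = 0 := by
  rcases Nat.eq_zero_or_pos p.length with h0 | h0
  · exact Or.inr h0
  · left
    have := congrArg List.length h
    simp only [List.length_take, List.length_drop] at this
    omega

theorem frontReach_le {cs : List Char} {P : List (List Char)} {m f : Nat}
    (h : FrontReach cs P m f) : f ≤ cs.length := by
  induction h with
  | zero => exact Nat.zero_le _
  | @succ m f p _ _ hmp ih =>
    rcases take_eq_imp_le hmp with h1 | h1 <;> omega

theorem backReach_le {cs : List Char} {S : List (List Char)} {m b : Nat}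
    (h : BackReach cs S m b) : b ≤ cs.length := by
  induction h with
  | zero => exact Nat.le_refl _
  | succ _ _ _ _ ih => omega

theorem testBit_frontMaskAt (cs : List Char) (P : List (List Char)) :
    ∀ m q, (frontMaskAt cs P m).testBit q = true ↔ FrontReach cs P m q := by
  intro m
  induction m with
  | zero =>
    intro q
    show (1 : Nat).testBit q = true ↔ _
    rw [show (1 : Nat) = 2 ^ 0 by norm_num, Nat.testBit_two_pow, decide_eq_true_eq]
    constructor
    · rintro rfl; exact FrontReach.zero
    · intro h; cases h; rfl
  | succ m ih =>
    intro q
    show (bStepF (frontMaskAt cs P m) _).testBit q = true ↔ _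
    unfold bStepF
    rw [testBit_foldl_or]
    simp only [Nat.zero_testBit, Bool.false_or, List.any_eq_true, List.mem_map]
    constructor
    · rintro ⟨lm, ⟨p, hp, rfl⟩, hbit⟩
      simp only [Nat.testBit_shiftLeft, Nat.testBit_and, Bool.and_eq_true, ge_iff_le,
        decide_eq_true_eq] at hbit
      obtain ⟨hge, hfront, hmask⟩ := hbit
      obtain ⟨hqn, hm⟩ := (testBit_pvPrefMask cs p (q - p.length)).mp hmask
      have hF := ih (q - p.length) |>.mp hfront
      have := FrontReach.succ hF hp hm
      rwa [show q - p.length + p.length = q by omega] at this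
    · intro h
      cases h with
      | @succ m f p hF hp hmp =>
        refine ⟨(p.length, pvPrefMask cs p), ⟨p, hp, rfl⟩, ?_⟩
        simp only [Nat.testBit_shiftLeft, Nat.testBit_and, Bool.and_eq_true, ge_iff_le,
          decide_eq_true_eq]
        have hfle := frontReach_le hF
        refine ⟨by omega, ?_, ?_⟩
        · rw [show f + p.length - p.length = f by omega]
          exact (ih f).mpr hF
        · rw [show f + p.length - p.length = f by omega]
          exact (testBit_pvPrefMask cs p f).mpr ⟨hfle, hmp⟩

theorem testBit_backMaskAt (cs : List Char) (S : List (List Char)) :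
    ∀ m q, (backMaskAt cs S m).testBit q = true ↔ BackReach cs S m q := by
  intro m
  induction m with
  | zero =>
    intro q
    show ((1 : Nat) <<< cs.length).testBit q = true ↔ _
    rw [Nat.one_shiftLeft, Nat.testBit_two_pow, decide_eq_true_eq]
    constructor
    · rintro rfl; exact BackReach.zero
    · intro h; cases h; rfl
  | succ m ih =>
    intro q
    show (bStepB (backMaskAt cs S m) _).testBit q = true ↔ _
    unfold bStepB
    rw [testBit_foldl_or]
    simp only [Nat.zero_testBit, Bool.false_or, List.any_eq_true, List.mem_map]
    constructor
    · rintro ⟨lm, ⟨s, hs, rfl⟩, hbit⟩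
      simp only [Nat.testBit_shiftRight, Nat.testBit_and, Bool.and_eq_true] at hbit
      obtain ⟨hback, hmask⟩ := hbit
      obtain ⟨hqn, hge, hm⟩ := (testBit_pvSuffMask cs s (s.length + q)).mp hmask
      have hB := ih (s.length + q) |>.mp hback
      have := BackReach.succ hB hs (by omega) hm
      rwa [show s.length + q - s.length = q by omega] at this
    · intro h
      cases h with
      | @succ m b s hB hs hle hms =>
        refine ⟨(s.length, pvSuffMask cs s), ⟨s, hs, rfl⟩, ?_⟩
        simp only [Nat.testBit_shiftRight, Nat.testBit_and, Bool.and_eq_true]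
        have hble := backReach_le hB
        rw [show s.length + (b - s.length) = b by omega]
        exact ⟨(ih b).mpr hB, (testBit_pvSuffMask cs s b).mpr ⟨hble, hle, hms⟩⟩

theorem and_ne_zero_iff (a b : Nat) :
    a &&& b ≠ 0 ↔ ∃ q, a.testBit q = true ∧ b.testBit q = true := by
  constructor
  · intro h
    by_contra hc
    apply h
    apply Nat.eq_of_testBit_eq
    intro i
    simp only [Nat.testBit_and, Nat.zero_testBit]
    cases ha : a.testBit i with
    | false => simp
    | true =>
      cases hb : b.testBit i with
      | false => simp
      | true => exact absurd ⟨i, ha, hb⟩ hc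
  · rintro ⟨q, h1, h2⟩ h0
    have : (a &&& b).testBit q = true := by rw [Nat.testBit_and, h1, h2]; rfl
    rw [h0] at this
    simp at this

theorem bitLoop_iff (cs : List Char) (P S : List (List Char)) :
    ∀ k m0, (bLoop (P.map fun p => (p.length, pvPrefMask cs p))
                   (S.map fun s => (s.length, pvSuffMask cs s))
                   k (frontMaskAt cs P m0) (backMaskAt cs S m0) = true ↔
      ∃ m, m0 < m ∧ m ≤ m0 + k ∧ frontMaskAt cs P m &&& backMaskAt cs S m ≠ 0) := by
  intro k
  induction k with
  | zero =>
    intro m0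
    simp only [bLoop]
    constructor
    · intro h; exact absurd h (by simp)
    · rintro ⟨m, h1, h2, _⟩; omega
  | succ k ih =>
    intro m0
    show (if _ ≠ 0 then true else _) = true ↔ _
    have hf : bStepF (frontMaskAt cs P m0) (P.map fun p => (p.length, pvPrefMask cs p))
        = frontMaskAt cs P (m0 + 1) := rfl
    have hb : bStepB (backMaskAt cs S m0) (S.map fun s => (s.length, pvSuffMask cs s))
        = backMaskAt cs S (m0 + 1) := rfl
    rw [hf, hb]
    by_cases hnz : frontMaskAt cs P (m0+1) &&& backMaskAt cs S (m0+1) ≠ 0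
    · rw [if_pos hnz]
      exact ⟨fun _ => ⟨m0 + 1, by omega, by omega, hnz⟩, fun _ => rfl⟩
    · rw [if_neg hnz]
      rw [ih (m0 + 1)]
      constructor
      · rintro ⟨m, h1, h2, h3⟩; exact ⟨m, by omega, by omega, h3⟩
      · rintro ⟨m, h1, h2, h3⟩
        refine ⟨m, ?_, by omega, h3⟩
        rcases Nat.eq_or_lt_of_le h1 with he | hl
        · rw [← he] at h3; exact absurd h3 hnz
        · omega

theorem frontReach_succ_inv {cs : List Char} {P : List (List Char)} {m q : Nat}
    (h : FrontReach cs P (m+1) q) :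
    ∃ f0 p, FrontReach cs P m f0 ∧ p ∈ P ∧ (cs.drop f0).take p.length = p ∧ q = f0 + p.length := by
  cases h with
  | @succ m f0 p hF hp hmp => exact ⟨f0, p, hF, hp, hmp, rfl⟩

theorem backReach_succ_inv {cs : List Char} {S : List (List Char)} {m q : Nat}
    (h : BackReach cs S (m+1) q) :
    ∃ b0 s, BackReach cs S m b0 ∧ s ∈ S ∧ s.length ≤ b0 ∧
      (cs.drop (b0 - s.length)).take s.length = s ∧ q = b0 - s.length := by
  cases h with
  | @succ m b0 s hB hs hle hms => exact ⟨b0, s, hB, hs, hle, hms, rfl⟩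

theorem alt_iff (cs : List Char) (P S : List (List Char)) (hPre : ¬ ([] ∈ P ∧ [] ∈ S)) :
    bLoop (P.map fun p => (p.length, pvPrefMask cs p))
          (S.map fun s => (s.length, pvSuffMask cs s))
          cs.length 1 (1 <<< cs.length) = true ↔ DecompC P S cs := by
  have h0f : (1 : Nat) = frontMaskAt cs P 0 := rfl
  have h0b : (1 <<< cs.length : Nat) = backMaskAt cs S 0 := rfl
  rw [h0b, h0f, bitLoop_iff cs P S cs.length 0]
  constructor
  · rintro ⟨m, hm1, hmn, hnz⟩
    obtain ⟨q, hqF, hqB⟩ := (and_ne_zero_iff _ _).mp hnz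
    have hF := (testBit_frontMaskAt cs P m q).mp hqF
    have hB := (testBit_backMaskAt cs S m q).mp hqB
    obtain ⟨m', rfl⟩ : ∃ m', m = m' + 1 := ⟨m - 1, by omega⟩
    obtain ⟨f0, p, hF0, hp, hmp, hqf⟩ := frontReach_succ_inv hF
    obtain ⟨b0, s, hB0, hs, hle, hms, hqb⟩ := backReach_succ_inv hB
    have h0 : f0 ≤ b0 := by omega
    have hPeel := chains_to_peel m' f0 b0 hF0 hB0 h0
    exact decomp_of_peel hPeel
      (decomp_of_exact ⟨p, hp, s, hs, by omega, hmp, hms⟩)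
  · intro hd
    have hcs : cs = segE cs 0 cs.length := by simp [segE]
    obtain ⟨j, f, b, hPeel, hEx⟩ := success_of_decomp hd 0 0 cs.length Peel.zero hcs
    obtain ⟨p, hp, s, hs, heq, hmp, hms⟩ := hEx
    have hcount := peel_count hPre hPeel
    have hb := peel_bounds hPeel
    have h1 := not_both_nil hPre hp hs
    refine ⟨j + 1, by omega, by omega, ?_⟩
    rw [and_ne_zero_iff]
    refine ⟨f + p.length, ?_, ?_⟩
    · exact (testBit_frontMaskAt cs P (j+1) (f + p.length)).mpr
        (FrontReach.succ (peel_front hPeel) hp hmp)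
    · have he : f + p.length = b - s.length := by omega
      rw [he]
      exact (testBit_backMaskAt cs S (j+1) (b - s.length)).mpr
        (BackReach.succ (peel_back hPeel) hs (by omega) hms)

-- ===== VERDICT (by name: the statement is the Claim_ definition above) =====
theorem matches_front_and_back_equal_spec : Claim_equal_matches_front_and_back_equal := by
  intro string P S _hDom hPre
  unfold Spec_matches_front_and_back_equal
  unfold matches_front_and_back_equal matches_front_and_back_equal_alt
  have hPre' : ¬ ([] ∈ P.map String.toList ∧ [] ∈ S.map String.toList) := by
    intro ⟨hp, hs⟩
    apply hPre
    constructor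
    · rcases List.mem_map.mp hp with ⟨x, hx, he⟩
      have : x = "" := String.toList_inj.mp (by simp [he])
      exact this ▸ hx
    · rcases List.mem_map.mp hs with ⟨x, hx, he⟩
      have : x = "" := String.toList_inj.mp (by simp [he])
      exact this ▸ hx
  rw [Bool.eq_iff_iff]
  rw [aGo_iff _ _ hPre' _ _ (Nat.lt_succ_self _)]
  exact (alt_iff _ _ _ hPre').symm
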